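-- pv_equiv track=rewrite | github.com/nlvegan/verenigingen | verenigingen/utils/services/sepa_service.py | _validate_iban_mod97
-- ===== SOURCE A (Python) =====
-- def _validate_iban_mod97(iban: str) -> bool:
--     """Validate IBAN using MOD-97 algorithm"""
--     try:
--         # Move first 4 characters to end
--         rearranged = iban[4:] + iban[:4]
--
--         # Replace letters with numbers (A=10, B=11, ..., Z=35)
--         numeric = ""
--         for char in rearranged:
--             if char.isalpha():
--                 numeric += str(ord(char) - ord("A") + 10)
--             else:
--                 numeric += char
--
--         # Check MOD 97
--         return int(numeric) % 97 == 1
--     except (ValueError, OverflowError):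
--         return False
-- ===== SOURCE B (Python) =====
-- def _validate_iban_mod97(iban: str) -> bool:
--     """Validate IBAN using MOD-97: single pass with a running remainder."""
--     rearranged = iban[4:] + iban[:4]
--     remainder = 0
--     for char in rearranged:
--         if char.isalpha():
--             remainder = (remainder * 100 + ord(char) - 55) % 97
--         elif char.isdigit():
--             remainder = (remainder * 10 + ord(char) - 48) % 97
--         else:
--             return False
--     return remainder == 1
-- ===== Notes on version B (the rewrite author's own statement) =====
-- stated objective: faster
-- what changed: B never builds the expanded digit string or a big integer: it folds each character of the rearranged IBAN (letters as their two-digit value) into a running remainder mod 97 in one pass, rejecting any non-alphanumeric character; Pre_ excludes strings that int() still accepts only thanks to its lenient grammar (surrounding whitespace, a sign, underscores), where A's result is an artefact of parsing with int().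
-- outside the precondition, e.g. on _validate_iban_mod97('   1'): A returns True, B returns False; on _validate_iban_mod97('-96'): A returns True, B returns False
import Mathlib
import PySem

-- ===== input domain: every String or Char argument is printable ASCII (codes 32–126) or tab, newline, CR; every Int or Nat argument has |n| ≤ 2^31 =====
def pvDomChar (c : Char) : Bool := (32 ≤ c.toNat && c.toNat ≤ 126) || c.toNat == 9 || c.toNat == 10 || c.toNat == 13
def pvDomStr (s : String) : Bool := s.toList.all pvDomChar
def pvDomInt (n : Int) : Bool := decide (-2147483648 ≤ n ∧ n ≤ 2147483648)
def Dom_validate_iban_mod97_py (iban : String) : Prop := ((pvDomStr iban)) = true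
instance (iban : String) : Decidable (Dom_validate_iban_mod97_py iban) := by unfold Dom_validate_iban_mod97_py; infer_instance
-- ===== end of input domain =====

-- B replaces A's "build the whole expanded digit string, parse one big integer, one big % 97"
-- by a single pass keeping a running remainder mod 97 (objective: faster, no big integer).

-- ===== PORT A =====
-- int(numeric) is ported by hand, step for step (exact CPython base-10 int() grammar:
-- surrounding whitespace, one optional sign, decimal digits with single underscores between digits);
-- PySem.Int.ofChars? computes the same thing but its recursion is private, so the proof
-- below could not unfold it.
def pvIsIntSpaceA (c : Char) : Bool :=
  c = ' ' || c = '\t' || c = '\n' || c = '\r' || c = '\x0b' || c = '\x0c'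

def pvDigitsValA? : List Char → Bool → Nat → Option Nat
  | [], afterDigit, acc => if afterDigit then some acc else none
  | c :: rest, afterDigit, acc =>
    if c.isDigit then pvDigitsValA? rest true (acc * 10 + (c.toNat - '0'.toNat))
    else if c = '_' ∧ afterDigit then
      match rest with
      | d :: _ => if d.isDigit then pvDigitsValA? rest false acc else none
      | [] => none
    else none

def pvIntOfCharsA? (s : List Char) : Option Int :=
  let cs := ((s.dropWhile pvIsIntSpaceA).reverse.dropWhile pvIsIntSpaceA).reverse
  if cs.head? = some '-' then (pvDigitsValA? (cs.drop 1) false 0).map (fun n => -(n : Int))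
  else if cs.head? = some '+' then (pvDigitsValA? (cs.drop 1) false 0).map (fun n => (n : Int))
  else (pvDigitsValA? cs false 0).map (fun n => (n : Int))

-- char.isalpha() / char.isdigit(): Char.isAlpha / Char.isDigit are exact on the ASCII domain Dom
def validate_iban_mod97_py (iban : String) : Bool :=
  let cs := iban.toList
  let rearranged := PySem.Chars.slice cs (some 4) none ++ PySem.Chars.slice cs none (some 4)
  let numeric := rearranged.foldl
    (fun acc c =>
      if c.isAlpha then acc ++ PySem.Int.toChars ((c.toNat : Int) - ('A'.toNat : Int) + 10)
      else acc ++ [c]) []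
  match pvIntOfCharsA? numeric with
  | none => false                      -- except ValueError: return False
  | some n => PySem.Int.mod n 97 == 1

-- ===== PORT B =====
-- the running-remainder scan of Source B; none = "a non-alphanumeric character was hit" (return False)
def pvScanB : List Char → Nat → Option Nat
  | [], r => some r
  | c :: rest, r =>
    if c.isAlpha then pvScanB rest ((r * 100 + (c.toNat - 55)) % 97)
    else if c.isDigit then pvScanB rest ((r * 10 + (c.toNat - 48)) % 97)
    else none

def validate_iban_mod97_py_alt (iban : String) : Bool :=
  let cs := iban.toList
  let rearranged := PySem.Chars.slice cs (some 4) none ++ PySem.Chars.slice cs none (some 4)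
  match pvScanB rearranged 0 with
  | none => false
  | some r => r == 1

-- ===== PRECONDITION & SPEC =====
-- the rearranged string, stripped of surrounding whitespace and an optional leading sign
def pvLenientCore (cs : List Char) : List Char :=
  let t := PySem.Chars.strip cs
  if t.head? = some '+' ∨ t.head? = some '-' then t.drop 1 else t

-- Pre_ excludes strings containing a non-alphanumeric character that int() nevertheless still
-- accepts through its lenient integer grammar (surrounding whitespace, one sign, underscores
-- between digits): A's result there is an artefact of parsing with int(), not the IBAN rule,
-- and B rejects any non-alphanumeric character.
def Pre_validate_iban_mod97_py (iban : String) : Prop :=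
  ¬ ((iban.toList.any (fun c => !(c.isAlpha || c.isDigit))) = true ∧
     ((pvLenientCore (PySem.Chars.slice iban.toList (some 4) none ++
        PySem.Chars.slice iban.toList none (some 4))).all
          (fun c => c.isAlpha || c.isDigit || c == '_')) = true)
instance (iban : String) : Decidable (Pre_validate_iban_mod97_py iban) := by
  unfold Pre_validate_iban_mod97_py; infer_instance

def pvWitness_validate_iban_mod97_py : String := "NL91ABNA0417164300"

def Spec_validate_iban_mod97_py (iban : String) (out : Bool) : Prop := out = validate_iban_mod97_py_alt iban
instance (iban : String) (out : Bool) : Decidable (Spec_validate_iban_mod97_py iban out) := by unfold Spec_validate_iban_mod97_py; infer_instance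

-- ===== CLAIM (what is proved, stated in full; the proofs are below) =====
def Claim_equal_validate_iban_mod97_py : Prop := ∀ (iban : String), Dom_validate_iban_mod97_py iban → Pre_validate_iban_mod97_py iban → Spec_validate_iban_mod97_py iban (validate_iban_mod97_py iban)

-- ===== LEMMAS AND PROOFS =====

-- the per-character expansion A's loop performs
def pvExpand (c : Char) : List Char :=
  if c.isAlpha then PySem.Int.toChars ((c.toNat : Int) - ('A'.toNat : Int) + 10) else [c]

-- the exact value A's int() computes on an all-alphanumeric core
def pvVal : List Char → Nat → Nat
  | [], acc => acc
  | c :: t, acc => pvVal t (if c.isAlpha then acc * 100 + (c.toNat - 55) else acc * 10 + (c.toNat - 48))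

theorem pvAlpha_bounds (c : Char) (h : c.isAlpha = true) :
    (65 ≤ c.toNat ∧ c.toNat ≤ 90) ∨ (97 ≤ c.toNat ∧ c.toNat ≤ 122) := by
  simp [Char.isAlpha, Char.isUpper, Char.isLower] at h
  rcases h with ⟨h1, h2⟩ | ⟨h1, h2⟩ <;> [left; right] <;>
    exact ⟨by exact_mod_cast h1, by exact_mod_cast h2⟩

theorem pvExpand_alpha (c : Char) (h : c.isAlpha = true) :
    pvExpand c = [Char.ofNat ((c.toNat - 55) / 10 + 48), Char.ofNat ((c.toNat - 55) % 10 + 48)] := by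
  have hb := pvAlpha_bounds c h
  unfold pvExpand
  rw [if_pos h]
  generalize c.toNat = k at hb ⊢
  rcases hb with ⟨h1, h2⟩ | ⟨h1, h2⟩ <;> interval_cases k <;> decide

theorem pvDigitChar (m : Nat) (hm : m ≤ 9) :
    (Char.ofNat (m + 48)).isDigit = true ∧ (Char.ofNat (m + 48)).isAlpha = false ∧
      (Char.ofNat (m + 48)).toNat = m + 48 := by
  interval_cases m <;> decide

theorem pvModStep (a m v : Nat) : ((a % 97) * m + v) % 97 = (a * m + v) % 97 := by
  simp [Nat.add_mod, Nat.mul_mod]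

theorem pvChar_eq_iff (c d : Char) : (c = d) = (c.toNat = d.toNat) := by
  apply propext
  constructor
  · rintro rfl; rfl
  · intro h
    exact Char.ext (UInt32.toBitVec_inj.mp (BitVec.toNat_inj.mp h))

theorem pvSpace_eq (c : Char) (h : pvDomChar c = true) :
    PySem.Chars.isspace c = pvIsIntSpaceA c := by
  simp only [pvDomChar, Bool.or_eq_true, Bool.and_eq_true, decide_eq_true_eq, beq_iff_eq] at h
  simp only [PySem.Chars.isspace, pvIsIntSpaceA, pvChar_eq_iff]
  simp only [show (' ').toNat = 32 from rfl, show ('\t').toNat = 9 from rfl,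
    show ('\n').toNat = 10 from rfl, show ('\r').toNat = 13 from rfl,
    show ('\x0b').toNat = 11 from rfl, show ('\x0c').toNat = 12 from rfl]
  by_cases h9 : c.toNat = 9 <;> by_cases h10 : c.toNat = 10 <;> by_cases h11 : c.toNat = 11 <;>
    by_cases h12 : c.toNat = 12 <;> by_cases h13 : c.toNat = 13 <;> by_cases h32 : c.toNat = 32 <;>
    simp [h9, h10, h11, h12, h13, h32] <;> omega

theorem pvSpace_not_alpha (c : Char) (h : PySem.Chars.isspace c = true) : c.isAlpha = false := by
  by_contra hc
  simp only [Bool.not_eq_false] at hc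
  have hb := pvAlpha_bounds c hc
  simp only [PySem.Chars.isspace, Bool.or_eq_true, Bool.and_eq_true, decide_eq_true_eq] at h
  omega

theorem pvNotSpace_intSpace (c : Char) (h : PySem.Chars.isspace c = false) :
    pvIsIntSpaceA c = false := by
  by_contra hc
  simp only [Bool.not_eq_false] at hc
  simp only [pvIsIntSpaceA, Bool.or_eq_true, decide_eq_true_eq] at hc
  rcases hc with ((((e | e) | e) | e) | e) | e <;> subst e <;> exact absurd h (by decide)

theorem pvDigit_not_intSpace (d : Char) (h : d.isDigit = true) : pvIsIntSpaceA d = false := by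
  have hb : 48 ≤ d.toNat ∧ d.toNat ≤ 57 := by
    simp [Char.isDigit] at h
    exact ⟨by exact_mod_cast h.1, by exact_mod_cast h.2⟩
  simp only [pvIsIntSpaceA, Bool.or_eq_false_iff, decide_eq_false_iff_not, pvChar_eq_iff]
  simp only [show (' ').toNat = 32 from rfl, show ('\t').toNat = 9 from rfl,
    show ('\n').toNat = 10 from rfl, show ('\r').toNat = 13 from rfl,
    show ('\x0b').toNat = 11 from rfl, show ('\x0c').toNat = 12 from rfl]
  omega

theorem pvDropWhile_commute (g : Char → List Char)
    (hg1 : ∀ c, PySem.Chars.isspace c = true → g c = [c])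
    (hg2 : ∀ c, PySem.Chars.isspace c = false → ∃ d u, g c = d :: u ∧ pvIsIntSpaceA d = false) :
    ∀ t : List Char, (∀ c ∈ t, pvDomChar c = true) →
      (t.flatMap g).dropWhile pvIsIntSpaceA = (t.dropWhile PySem.Chars.isspace).flatMap g := by
  intro t
  induction t with
  | nil => simp
  | cons c t' ih =>
    intro hd
    have hc := hd c (List.mem_cons_self ..)
    have ht' : ∀ x ∈ t', pvDomChar x = true := fun x hx => hd x (List.mem_cons_of_mem _ hx)
    by_cases hs : PySem.Chars.isspace c = true
    · have hsA : pvIsIntSpaceA c = true := by rw [← pvSpace_eq c hc]; exact hs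
      simp only [List.flatMap_cons, hg1 c hs, List.singleton_append, List.dropWhile_cons,
        hsA, hs, if_true]
      exact ih ht'
    · simp only [Bool.not_eq_true] at hs
      obtain ⟨d, u, he, hdns⟩ := hg2 c hs
      simp only [List.flatMap_cons, he, List.cons_append, List.dropWhile_cons, hdns, hs,
        Bool.false_eq_true, if_false]

theorem pvExpand_space (c : Char) (h : PySem.Chars.isspace c = true) : pvExpand c = [c] := by
  unfold pvExpand; rw [if_neg (by simp [pvSpace_not_alpha c h])]

theorem pvExpand_nonspace (c : Char) (h : PySem.Chars.isspace c = false) :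
    ∃ d u, pvExpand c = d :: u ∧ pvIsIntSpaceA d = false := by
  by_cases ha : c.isAlpha
  · refine ⟨_, _, pvExpand_alpha c ha, ?_⟩
    have hb := pvAlpha_bounds c ha
    exact pvDigit_not_intSpace _ (pvDigitChar ((c.toNat - 55) / 10) (by omega)).1
  · exact ⟨c, [], by unfold pvExpand; rw [if_neg ha], pvNotSpace_intSpace c h⟩

theorem pvStrip_expand (t : List Char) (hd : ∀ c ∈ t, pvDomChar c = true) :
    (((t.flatMap pvExpand).dropWhile pvIsIntSpaceA).reverse.dropWhile pvIsIntSpaceA).reverse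
      = (PySem.Chars.strip t).flatMap pvExpand := by
  rw [pvDropWhile_commute pvExpand pvExpand_space pvExpand_nonspace t hd]
  set t1 := t.dropWhile PySem.Chars.isspace with ht1
  have hd1 : ∀ c ∈ t1.reverse, pvDomChar c = true := by
    intro c hcm
    exact hd c ((List.dropWhile_sublist _).mem (List.mem_reverse.mp hcm))
  rw [List.reverse_flatMap]
  have hgs : ∀ c, PySem.Chars.isspace c = true → (List.reverse ∘ pvExpand) c = [c] := by
    intro c h; simp [Function.comp, pvExpand_space c h]
  have hgn : ∀ c, PySem.Chars.isspace c = false →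
      ∃ d u, (List.reverse ∘ pvExpand) c = d :: u ∧ pvIsIntSpaceA d = false := by
    intro c h
    by_cases ha : c.isAlpha
    · refine ⟨Char.ofNat ((c.toNat - 55) % 10 + 48), [Char.ofNat ((c.toNat - 55) / 10 + 48)],
        by simp [Function.comp, pvExpand_alpha c ha], ?_⟩
      exact pvDigit_not_intSpace _ (pvDigitChar ((c.toNat - 55) % 10) (by omega)).1
    · refine ⟨c, [], ?_, pvNotSpace_intSpace c h⟩
      simp only [Function.comp_apply]
      rw [show pvExpand c = [c] from by unfold pvExpand; rw [if_neg ha]]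
      simp
  rw [pvDropWhile_commute (List.reverse ∘ pvExpand) hgs hgn t1.reverse hd1]
  rw [← List.reverse_reverse (List.dropWhile PySem.Chars.isspace t1.reverse)]
  rw [← List.reverse_flatMap]
  simp only [List.reverse_reverse]
  congr 1

theorem pvExpand_head (c : Char) :
    ∃ d r, pvExpand c = d :: r ∧ (d = c ∨ d.isDigit = true) := by
  by_cases ha : c.isAlpha
  · refine ⟨_, _, pvExpand_alpha c ha, Or.inr ?_⟩
    have hb := pvAlpha_bounds c ha
    exact (pvDigitChar ((c.toNat - 55) / 10) (by omega)).1
  · exact ⟨c, [], by unfold pvExpand; rw [if_neg ha], Or.inl rfl⟩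

-- int() success implies every char of the parsed tail is a digit or an underscore
theorem pvDigitsVal_chars : ∀ (w : List Char) (b : Bool) (acc v : Nat),
    pvDigitsValA? w b acc = some v → ∀ x ∈ w, x.isDigit = true ∨ x = '_' := by
  intro w
  induction w with
  | nil => intro b acc v _ x hx; cases hx
  | cons c rest ih =>
    intro b acc v h x hx
    by_cases hd : c.isDigit
    · rcases List.mem_cons.mp hx with rfl | hx'
      · exact Or.inl hd
      · rw [pvDigitsValA?.eq_def] at h
        simp only [if_pos hd] at h
        exact ih _ _ _ h x hx'
    · rw [pvDigitsValA?.eq_def] at h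
      simp only [if_neg hd] at h
      by_cases hu : c = '_' ∧ b = true
      · rw [if_pos hu] at h
        rcases List.mem_cons.mp hx with rfl | hx'
        · exact Or.inr hu.1
        · cases rest with
          | nil => cases h
          | cons d rest' =>
            dsimp only at h
            by_cases hdd : d.isDigit
            · rw [if_pos hdd] at h
              exact ih _ _ _ h x hx'
            · rw [if_neg hdd] at h; cases h
      · rw [if_neg hu] at h; cases h

-- on an all-alphanumeric nonempty core, A's int() parse succeeds with value pvVal
theorem pvDigitsVal_alnum : ∀ (t : List Char), (∀ c ∈ t, (c.isAlpha || c.isDigit) = true) →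
    ∀ (b : Bool) (acc : Nat), (b = true ∨ t ≠ []) →
      pvDigitsValA? (t.flatMap pvExpand) b acc = some (pvVal t acc) := by
  intro t
  induction t with
  | nil =>
    intro _ b acc hb
    rcases hb with rfl | hne
    · simp [pvDigitsValA?, pvVal]
    · exact absurd rfl hne
  | cons c t' ih =>
    intro hal b acc _
    have hc := hal c (List.mem_cons_self ..)
    have ht' : ∀ x ∈ t', (x.isAlpha || x.isDigit) = true :=
      fun x hx => hal x (List.mem_cons_of_mem _ hx)
    by_cases ha : c.isAlpha
    · have hb := pvAlpha_bounds c ha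
      obtain ⟨hd1, ha1, ht1⟩ := pvDigitChar ((c.toNat - 55) / 10) (by omega)
      obtain ⟨hd2, ha2, ht2⟩ := pvDigitChar ((c.toNat - 55) % 10) (by omega)
      rw [List.flatMap_cons, pvExpand_alpha c ha]
      simp only [List.cons_append, List.nil_append, pvDigitsValA?, hd1, hd2, ht1, ht2, if_pos]
      have e1 : (acc * 10 + ((c.toNat - 55) / 10 + 48 - '0'.toNat)) * 10 +
          ((c.toNat - 55) % 10 + 48 - '0'.toNat) = acc * 100 + (c.toNat - 55) := by
        show (acc * 10 + ((c.toNat - 55) / 10 + 48 - 48)) * 10 +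
          ((c.toNat - 55) % 10 + 48 - 48) = _
        omega
      rw [e1, ih ht' true _ (Or.inl rfl)]
      simp [pvVal, ha]
    · have hd : c.isDigit = true := by
        rcases Bool.or_eq_true_iff.mp hc with h | h
        · exact absurd h ha
        · exact h
      rw [List.flatMap_cons, show pvExpand c = [c] from by unfold pvExpand; rw [if_neg ha]]
      simp only [List.singleton_append, pvDigitsValA?, hd, if_pos]
      rw [show '0'.toNat = 48 from rfl, ih ht' true _ (Or.inl rfl)]
      simp [pvVal, ha]

-- B's scan computes the same value mod 97
theorem pvScan_alnum : ∀ (t : List Char), (∀ c ∈ t, (c.isAlpha || c.isDigit) = true) →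
    ∀ acc : Nat, pvScanB t (acc % 97) = some (pvVal t acc % 97) := by
  intro t
  induction t with
  | nil => intro _ acc; simp [pvScanB, pvVal]
  | cons c t' ih =>
    intro hal acc
    have hc := hal c (List.mem_cons_self ..)
    have ht' : ∀ x ∈ t', (x.isAlpha || x.isDigit) = true :=
      fun x hx => hal x (List.mem_cons_of_mem _ hx)
    by_cases ha : c.isAlpha
    · rw [pvScanB, if_pos ha, pvModStep acc 100 (c.toNat - 55), ih ht']
      simp [pvVal, ha]
    · have hd : c.isDigit = true := by
        rcases Bool.or_eq_true_iff.mp hc with h | h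
        · exact absurd h ha
        · exact h
      rw [pvScanB, if_neg ha, if_pos hd, pvModStep acc 10 (c.toNat - 48), ih ht']
      simp [pvVal, ha]

theorem pvScan_none (t : List Char) (h : ∃ c ∈ t, (c.isAlpha || c.isDigit) = false) :
    ∀ r, pvScanB t r = none := by
  induction t with
  | nil => rcases h with ⟨c, hc, _⟩; cases hc
  | cons c t' ih =>
    intro r
    obtain ⟨x, hx, hxf⟩ := h
    rcases List.mem_cons.mp hx with rfl | hx'
    · have ha : x.isAlpha = false := by
        cases e : x.isAlpha <;> simp [e] at hxf ⊢
      have hd : x.isDigit = false := by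
        cases e : x.isDigit <;> simp [e, ha] at hxf ⊢
      rw [pvScanB, if_neg (by simp [ha]), if_neg (by simp [hd])]
    · rw [pvScanB]
      split
      · exact ih ⟨x, hx', hxf⟩ _
      · split
        · exact ih ⟨x, hx', hxf⟩ _
        · rfl

theorem pvDropWhile_of_all {p : Char → Bool} :
    ∀ (l : List Char), (∀ c ∈ l, p c = false) → l.dropWhile p = l := by
  intro l h
  cases l with
  | nil => rfl
  | cons c l' =>
    rw [List.dropWhile_cons, if_neg (by simp [h c (List.mem_cons_self ..)])]

theorem pvExpand_chars (c : Char) (hc : (c.isAlpha || c.isDigit) = true) :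
    ∀ x ∈ pvExpand c, x.isDigit = true := by
  intro x hx
  by_cases ha : c.isAlpha
  · have hb := pvAlpha_bounds c ha
    rw [pvExpand_alpha c ha] at hx
    obtain ⟨hd1, -, -⟩ := pvDigitChar ((c.toNat - 55) / 10) (by omega)
    obtain ⟨hd2, -, -⟩ := pvDigitChar ((c.toNat - 55) % 10) (by omega)
    simp only [List.mem_cons, List.not_mem_nil, or_false] at hx
    rcases hx with rfl | rfl
    · exact hd1
    · exact hd2
  · rw [show pvExpand c = [c] from by unfold pvExpand; rw [if_neg ha]] at hx
    simp only [List.mem_singleton] at hx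
    subst hx
    rcases Bool.or_eq_true_iff.mp hc with h' | h'
    · exact absurd h' ha
    · exact h'

-- transfer "digit or underscore" back through the expansion
theorem pvBack (c : Char) (h : ∀ x ∈ pvExpand c, x.isDigit = true ∨ x = '_') :
    (c.isAlpha || c.isDigit || c == '_') = true := by
  by_cases ha : c.isAlpha
  · simp [ha]
  · have := h c (by rw [show pvExpand c = [c] from by unfold pvExpand; rw [if_neg ha]]; simp)
    rcases this with hd | hu
    · simp [hd]
    · simp [hu]

-- if A's int() parse of the expanded string succeeds, every character of the lenient core
-- of the rearranged string is alphanumeric or an underscore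
theorem pvParse_core (t : List Char) (hd : ∀ c ∈ t, pvDomChar c = true)
    (n : Int) (h : pvIntOfCharsA? (t.flatMap pvExpand) = some n) :
    ∀ c ∈ pvLenientCore t, (c.isAlpha || c.isDigit || c == '_') = true := by
  unfold pvIntOfCharsA? at h
  dsimp only at h
  rw [pvStrip_expand t hd] at h
  unfold pvLenientCore
  dsimp only
  cases hu : PySem.Chars.strip t with
  | nil =>
    intro c hc
    simp at hc
  | cons c0 u' =>
    rw [hu] at h
    by_cases hp : c0 = '+'
    · subst hp
      rw [List.flatMap_cons, show pvExpand '+' = ['+'] from by decide] at h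
      simp only [List.singleton_append, List.head?_cons, reduceCtorEq,
        List.drop_one, List.tail_cons, reduceIte] at h
      cases hv : pvDigitsValA? (u'.flatMap pvExpand) false 0 with
      | none => rw [hv] at h; simp at h
      | some v =>
        have hall := pvDigitsVal_chars _ _ _ _ hv
        intro c hc
        simp only [List.head?_cons, reduceCtorEq, true_or, if_true,
          List.drop_one, List.tail_cons] at hc
        exact pvBack c (fun x hx => hall x (List.mem_flatMap.mpr ⟨c, hc, hx⟩))
    · by_cases hm : c0 = '-'
      · subst hm
        rw [List.flatMap_cons, show pvExpand '-' = ['-'] from by decide] at h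
        simp only [List.singleton_append, List.head?_cons,
          List.drop_one, List.tail_cons, reduceIte] at h
        cases hv : pvDigitsValA? (u'.flatMap pvExpand) false 0 with
        | none => rw [hv] at h; simp at h
        | some v =>
          have hall := pvDigitsVal_chars _ _ _ _ hv
          intro c hc
          simp only [List.head?_cons, or_true,
            if_true, List.drop_one, List.tail_cons] at hc
          exact pvBack c (fun x hx => hall x (List.mem_flatMap.mpr ⟨c, hc, hx⟩))
      · obtain ⟨d, r, he, hdr⟩ := pvExpand_head c0
        have hdne : d ≠ '-' ∧ d ≠ '+' := by
          rcases hdr with rfl | hdig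
          · exact ⟨hm, hp⟩
          · constructor <;> rintro rfl <;> simp at hdig
        rw [List.flatMap_cons, he, List.cons_append, List.head?_cons] at h
        rw [if_neg (by simp [hdne.1]), if_neg (by simp [hdne.2])] at h
        rw [← List.cons_append, ← he, ← List.flatMap_cons] at h
        cases hv : pvDigitsValA? ((c0 :: u').flatMap pvExpand) false 0 with
        | none => rw [hv] at h; simp at h
        | some v =>
          have hall := pvDigitsVal_chars _ _ _ _ hv
          intro c hc
          rw [if_neg (by simp only [List.head?_cons, Option.some.injEq]; rintro (h' | h') <;> simp_all)] at hc
          exact pvBack c (fun x hx => hall x (List.mem_flatMap.mpr ⟨c, hc, hx⟩))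

theorem pvSlice_sublist {α : Type} (xs : List α) (a b : Option Int) :
    (PySem.List.slice xs a b).Sublist xs := by
  unfold PySem.List.slice
  exact (List.take_sublist _ _).trans (List.drop_sublist _ _)

theorem pvIntMod_eq (v : Nat) : PySem.Int.mod (v : Int) 97 = ((v % 97 : Nat) : Int) := by
  have h1 : PySem.Int.mod (v : Int) 97 = (v : Int) % 97 := by
    simp [PySem.Int.mod, Int.fmod_eq_emod]
  rw [h1]
  push_cast
  rfl

theorem validate_iban_mod97_py_spec : Claim_equal_validate_iban_mod97_py := by
  intro iban hdom hpre
  unfold Spec_validate_iban_mod97_py validate_iban_mod97_py validate_iban_mod97_py_alt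
  dsimp only
  have hdc : ∀ c ∈ iban.toList, pvDomChar c = true := by
    have h : pvDomStr iban = true := hdom
    simpa [pvDomStr, List.all_eq_true] using h
  set cs := iban.toList with hcs
  set t := PySem.Chars.slice cs (some 4) none ++ PySem.Chars.slice cs none (some 4) with htdef
  have hdt : ∀ c ∈ t, pvDomChar c = true := by
    intro c hcm
    rcases List.mem_append.mp hcm with h | h
    · exact hdc c ((pvSlice_sublist cs (some 4) none).mem (by simpa using h))
    · exact hdc c ((pvSlice_sublist cs none (some 4)).mem (by simpa using h))
  have hf : (t.foldl
      (fun acc c =>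
        if c.isAlpha then acc ++ PySem.Int.toChars ((c.toNat : Int) - ('A'.toNat : Int) + 10)
        else acc ++ [c]) []) = t.flatMap pvExpand := by
    have he : (fun (acc : List Char) c =>
        if c.isAlpha then acc ++ PySem.Int.toChars ((c.toNat : Int) - ('A'.toNat : Int) + 10)
        else acc ++ [c]) = fun (acc : List Char) c => acc ++ pvExpand c := by
      funext acc c; unfold pvExpand; split <;> rfl
    rw [he, PySem.List.foldl_append_eq_flatMap, List.nil_append]
  rw [hf]
  by_cases hal : ∀ c ∈ t, (c.isAlpha || c.isDigit) = true
  · -- all alphanumeric: both sides compute pvVal t 0 mod 97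
    cases hte : t with
    | nil =>
      simp [pvIntOfCharsA?, pvDigitsValA?, pvScanB]
    | cons c0 t' =>
      rw [← hte]
      have hne : t ≠ [] := by rw [hte]; simp
      have hexp : ∀ x ∈ t.flatMap pvExpand, x.isDigit = true := by
        intro x hx
        obtain ⟨c, hc, hxc⟩ := List.mem_flatMap.mp hx
        exact pvExpand_chars c (hal c hc) x hxc
      have hns : ∀ x ∈ t.flatMap pvExpand, pvIsIntSpaceA x = false :=
        fun x hx => pvDigit_not_intSpace x (hexp x hx)
      have hv := pvDigitsVal_alnum t hal false 0 (Or.inr hne)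
      have hscan := pvScan_alnum t hal 0
      simp only [Nat.zero_mod] at hscan
      unfold pvIntOfCharsA?
      dsimp only
      rw [pvDropWhile_of_all _ hns,
          pvDropWhile_of_all _ (fun x hx => hns x (List.mem_reverse.mp hx)),
          List.reverse_reverse]
      cases hE : t.flatMap pvExpand with
      | nil =>
        rw [hE] at hv; rw [pvDigitsValA?] at hv; simp at hv
      | cons hd tl =>
        have hhd : hd.isDigit = true := hexp hd (by rw [hE]; simp)
        have h1 : hd ≠ '-' := by rintro rfl; simp at hhd
        have h2 : hd ≠ '+' := by rintro rfl; simp at hhd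
        rw [hE] at hv
        rw [List.head?_cons, if_neg (by simp [h1]), if_neg (by simp [h2]), hv, hscan]
        show (PySem.Int.mod ((pvVal t 0 : Nat) : Int) 97 == 1) = (pvVal t 0 % 97 == 1)
        rw [pvIntMod_eq, Bool.eq_iff_iff]
        simp only [beq_iff_eq]
        omega
  · -- some non-alphanumeric character: B rejects; Pre_ forces A's int() to fail too
    push_neg at hal
    obtain ⟨c, hc, hcf⟩ := hal
    have hBnone : pvScanB t 0 = none :=
      pvScan_none t ⟨c, hc, by cases e : (c.isAlpha || c.isDigit) <;> simp_all⟩ 0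
    rw [hBnone]
    have hq : (iban.toList.any (fun c => !(c.isAlpha || c.isDigit))) = true := by
      apply List.any_eq_true.mpr
      refine ⟨c, ?_, by simp [hcf]⟩
      rcases List.mem_append.mp hc with h | h
      · exact (pvSlice_sublist cs (some 4) none).mem (by simpa using h)
      · exact (pvSlice_sublist cs none (some 4)).mem (by simpa using h)
    have hcore : ¬ ((pvLenientCore t).all (fun c => c.isAlpha || c.isDigit || c == '_')) = true := by
      intro hcr
      exact hpre ⟨hq, hcr⟩
    cases hA : pvIntOfCharsA? (t.flatMap pvExpand) with
    | none => rfl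
    | some n =>
      exact absurd (List.all_eq_true.mpr fun x hx => pvParse_core t hdt n hA x hx) hcore

-- ===== VERDICT =====
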